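-- pv_equiv track=rewrite | github.com/tatilattanzi/querido-diario | data_collection/gazette/mapeadores/base/mapeador.py | name_abbreviation
-- ===== SOURCE A (Python) =====
-- def name_abbreviation(city_name):
--     # problema: d'agua está virando dagua no codigo, chega aqui usando d no split e nao a
--     subnames = city_name.split()
--     abbrev_list = []
--
--     if len(subnames) > 1:
--         begin = ""
--         end = ""
--         for i in range(len(subnames)):
--             if subnames[i] not in ["da", "de", "do"]:
--                 begin += subnames[i][0]
--                 for y in range(i + 1, len(subnames)):
--                     if subnames[y] not in ["da", "de", "do"]:
--                         end += subnames[y]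
--                 abbrev = begin + end
--                 if len(abbrev) > 3:
--                     abbrev_list.append(abbrev)
--                 end = ""
--
--     return abbrev_list
-- ===== SOURCE B (Python) =====
-- def name_abbreviation(city_name):
--     subnames = city_name.split()
--     if len(subnames) <= 1:
--         return []
--     stop = {"da", "de", "do"}
--     # suffix[i] = concatenation of every non-stopword word after index i
--     suffix = [""] * len(subnames)
--     acc = ""
--     for i in range(len(subnames) - 1, -1, -1):
--         suffix[i] = acc
--         if subnames[i] not in stop:
--             acc = subnames[i] + acc
--     result = []
--     begin = ""
--     for i, w in enumerate(subnames):
--         if w not in stop: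
--             begin += w[0]
--             ab = begin + suffix[i]
--             if len(ab) > 3:
--                 result.append(ab)
--     return result
-- ===== Notes on version B (the rewrite author's own statement) =====
-- stated objective: alternative
-- what changed: A re-scans the whole remaining tail for every non-stopword word to rebuild the suffix concatenation; B precomputes a suffix-concatenation table in one right-to-left pass and then emits abbreviations in a single forward pass.
import Mathlib
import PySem

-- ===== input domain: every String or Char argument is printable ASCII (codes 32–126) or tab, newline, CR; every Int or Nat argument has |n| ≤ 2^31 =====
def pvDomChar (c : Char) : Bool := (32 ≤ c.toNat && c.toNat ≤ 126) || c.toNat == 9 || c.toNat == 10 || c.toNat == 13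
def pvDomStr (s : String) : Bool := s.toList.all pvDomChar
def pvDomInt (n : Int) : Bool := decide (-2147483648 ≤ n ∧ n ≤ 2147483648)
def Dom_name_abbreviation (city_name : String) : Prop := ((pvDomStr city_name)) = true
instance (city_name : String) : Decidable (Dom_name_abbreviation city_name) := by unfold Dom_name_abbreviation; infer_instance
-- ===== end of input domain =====

-- B replaces A's per-word re-scan of the tail by a precomputed suffix-concatenation table plus one forward pass (alternative decomposition; same measured cost).


-- ===== PORT A =====
-- Strings are handled on the List Char side (PySem.Chars layer); words from split() are nonempty,
-- so `w.take 1` is exactly Python's `w[0]` there.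
def pvStopA (w : List Char) : Bool := w == "da".toList || w == "de".toList || w == "do".toList

-- A's inner loop: end += subnames[y] over the remaining words (left to right)
def pvEndA (ws : List (List Char)) : List Char :=
  ws.foldl (fun e w => if pvStopA w then e else e ++ w) []

-- A's outer loop, state = (begin, abbrev_list)
def pvLoopA (b : List Char) (acc : List String) : List (List Char) → List String
  | [] => acc
  | w :: ws =>
    if pvStopA w then pvLoopA b acc ws
    else
      let b' := b ++ w.take 1
      let ab := b' ++ pvEndA ws
      pvLoopA b' (if 3 < ab.length then acc ++ [String.ofList ab] else acc) ws

def name_abbreviation (city_name : String) : List String :=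
  let subnames := (PySem.Str.split₀ city_name).map String.toList
  if 1 < subnames.length then pvLoopA [] [] subnames else []

-- ===== PORT B =====
def pvStopB (w : List Char) : Bool := ["da".toList, "de".toList, "do".toList].contains w

-- right-to-left pass: returns (suffix table, concatenation of all non-stopword words)
def pvSufB : List (List Char) → List (List Char) × List Char
  | [] => ([], [])
  | w :: ws =>
    let (t, s) := pvSufB ws
    (s :: t, if pvStopB w then s else w ++ s)

-- forward pass over words zipped with their suffix entries
def pvFwdB (b : List Char) : List (List Char × List Char) → List String
  | [] => []
  | (w, suf) :: rest =>
    if pvStopB w then pvFwdB b rest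
    else
      let b' := b ++ w.take 1
      let ab := b' ++ suf
      (if 3 < ab.length then [String.ofList ab] else []) ++ pvFwdB b' rest

def name_abbreviation_alt (city_name : String) : List String :=
  let subnames := (PySem.Str.split₀ city_name).map String.toList
  if subnames.length ≤ 1 then []
  else pvFwdB [] (subnames.zip (pvSufB subnames).1)

-- ===== PRECONDITION & SPEC =====
def Spec_name_abbreviation (city_name : String) (out : List String) : Prop := out = name_abbreviation_alt city_name
instance (city_name : String) (out : List String) : Decidable (Spec_name_abbreviation city_name out) := by unfold Spec_name_abbreviation; infer_instance

-- ===== CLAIM (what is proved, stated in full; the proofs are below) =====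
def Claim_equal_name_abbreviation : Prop := ∀ (city_name : String), Dom_name_abbreviation city_name → Spec_name_abbreviation city_name (name_abbreviation city_name)

-- ===== LEMMAS AND PROOFS =====
theorem pvStop_eq (w : List Char) : pvStopB w = pvStopA w := by
  simp only [pvStopA, pvStopB, List.contains_cons, List.contains_nil, Bool.or_false,
    Bool.or_assoc]

theorem pvEndA_eq (ws : List (List Char)) : pvEndA ws = (pvSufB ws).2 := by
  suffices h : ∀ e, ws.foldl (fun e w => if pvStopA w then e else e ++ w) e = e ++ (pvSufB ws).2 by
    simpa [pvEndA] using h []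
  induction ws with
  | nil => simp [pvSufB]
  | cons w ws ih =>
    intro e
    by_cases hw : pvStopA w = true <;>
      simp [pvSufB, pvStop_eq, hw, ih, List.append_assoc]

theorem pvLoopA_eq (ws : List (List Char)) : ∀ b acc,
    pvLoopA b acc ws = acc ++ pvFwdB b (ws.zip (pvSufB ws).1) := by
  induction ws with
  | nil => intro b acc; simp [pvLoopA, pvFwdB]
  | cons w ws ih =>
    intro b acc
    by_cases hw : pvStopA w = true <;>
      simp [pvLoopA, pvSufB, pvFwdB, pvStop_eq, hw, ih, pvEndA_eq, List.append_assoc] <;>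
      split_ifs <;> simp

-- ===== VERDICT (by name: the statement is the Claim_ definition above) =====
theorem name_abbreviation_spec : Claim_equal_name_abbreviation := by
  intro city_name _
  unfold Spec_name_abbreviation name_abbreviation name_abbreviation_alt
  set ws := (PySem.Str.split₀ city_name).map String.toList with hws
  by_cases h : 1 < ws.length
  · simp [h, Nat.not_le.mpr h, pvLoopA_eq]
  · simp [h, Nat.le_of_not_lt (by simpa using h)]
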